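-- pv_equiv track=rewrite | github.com/KynaHui/notetaking_tool | transcript_deepgram.py | trim_overlap
-- ===== SOURCE A (Python) =====
-- def trim_overlap(prev_text: str,
--                  new_text: str,
--                  min_overlap: int = 12,
--                  max_window: int = 180) -> str:
--     """
--     Remove duplicated prefix of new_text that already exists as a suffix of prev_text.
--     Exact match search (case-insensitive) up to max_window chars of prev_text.
--     """
--     if not prev_text or not new_text:
--         return new_text
--
--     prev_slice = prev_text[-max_window:]
--     new_slice = new_text[:max_window]
--
--     prev_low = prev_slice.lower()
--     new_low = new_slice.lower()
--
--     longest = 0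
--     max_len = min(len(prev_low), len(new_low))
--     for k in range(max_len, min_overlap - 1, -1):
--         if prev_low.endswith(new_low[:k]):
--             longest = k
--             break
--
--     if longest >= min_overlap:
--         return new_text[longest:].lstrip()
--     return new_text
-- ===== SOURCE B (Python) =====
-- def trim_overlap(prev_text: str,
--                  new_text: str,
--                  min_overlap: int = 12,
--                  max_window: int = 180) -> str:
--     if not prev_text or not new_text:
--         return new_text
--
--     prev_low = prev_text[-max_window:].lower()
--     new_low = new_text[:max_window].lower()
--     n = len(new_low)
--
--     # KMP failure table: fail[k] = length of the longest proper border of new_low[:k]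
--     fail = [0] * (n + 1)
--     for k in range(2, n + 1):
--         b = fail[k - 1]
--         while b > 0 and new_low[b] != new_low[k - 1]:
--             b = fail[b]
--         fail[k] = b + 1 if new_low[b] == new_low[k - 1] else 0
--
--     # stream prev_low through the KMP automaton of new_low; the final state is the
--     # length of the longest prefix of new_low that is a suffix of prev_low
--     state = 0
--     for c in prev_low:
--         while state > 0 and (state == n or new_low[state] != c):
--             state = fail[state]
--         if state < n and new_low[state] == c:
--             state += 1
--
--     if state >= min_overlap:
--         return new_text[state:].lstrip()
--     return new_text
-- ===== Notes on version B (the rewrite author's own statement) =====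
-- stated objective: alternative
-- what changed: Replaces A's countdown over candidate overlap lengths (one endswith(new_low[:k]) test per k) by the KMP string-matching automaton: a failure table is built once for new_low and prev_low is streamed through it, the final automaton state being the longest prefix of new_low that is a suffix of prev_low.
import Mathlib
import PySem

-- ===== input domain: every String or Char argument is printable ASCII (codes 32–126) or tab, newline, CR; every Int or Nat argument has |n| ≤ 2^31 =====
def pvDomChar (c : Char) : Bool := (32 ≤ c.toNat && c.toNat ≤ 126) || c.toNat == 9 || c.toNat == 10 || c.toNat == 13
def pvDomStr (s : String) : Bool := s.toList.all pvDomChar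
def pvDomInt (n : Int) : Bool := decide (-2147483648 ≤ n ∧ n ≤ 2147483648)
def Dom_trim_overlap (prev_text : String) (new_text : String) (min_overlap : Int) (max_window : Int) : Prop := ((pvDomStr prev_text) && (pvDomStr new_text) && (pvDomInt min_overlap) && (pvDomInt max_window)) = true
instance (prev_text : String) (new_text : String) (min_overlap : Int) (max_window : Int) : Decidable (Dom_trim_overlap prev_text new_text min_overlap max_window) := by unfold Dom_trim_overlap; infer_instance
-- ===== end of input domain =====

-- B replaces A's countdown over candidate overlap lengths (one endswith test per length)
-- by the KMP automaton: a failure table built once for new_low, then prev_low streamed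
-- through it; objective: alternative (a genuinely different algorithm, not claimed faster).

-- ===== PORT A =====
-- the 'for k in range(max_len, min_overlap - 1, -1): if prev_low.endswith(new_low[:k]): longest = k; break' loop;
-- the countdown is a recursion on k (Python's range is lazy; the loop breaks at the first match)
def trimLoopA (prev_low new_low : String) (k m : Int) : Int :=
  if k ≤ m then 0
  else if PySem.Str.endswith prev_low (PySem.Str.slice new_low none (some k)) then k
  else trimLoopA prev_low new_low (k - 1) m
termination_by (k - m).toNat
decreasing_by simp_wf; omega

def trim_overlap (prev_text : String) (new_text : String) (min_overlap : Int) (max_window : Int) : String :=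
  if prev_text = "" ∨ new_text = "" then new_text
  else
    let prev_slice := PySem.Str.slice prev_text (some (-max_window)) none
    let new_slice := PySem.Str.slice new_text none (some max_window)
    let prev_low := PySem.Str.lower prev_slice
    let new_low := PySem.Str.lower new_slice
    let max_len : Int := min (PySem.Str.len prev_low) (PySem.Str.len new_low)
    let longest : Int := trimLoopA prev_low new_low max_len (min_overlap - 1)
    if longest ≥ min_overlap then PySem.Str.lstrip (PySem.Str.slice new_text (some longest) none)
    else new_text

-- ===== PORT B =====
-- Source B's inner 'while b > 0 and new_low[b] != new_low[k-1]: b = fail[b]' (fuel = b: the chain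
-- strictly decreases in Python, so b steps always suffice; list indexing is in range whenever
-- Python evaluates it, the getD default is never the value read)
def kmpTableLoop (pat : List Char) (c : Char) (fail : List Nat) : Nat → Nat → Nat
  | 0, b => b
  | fuel + 1, b =>
    if 0 < b ∧ pat.getD b ' ' ≠ c then kmpTableLoop pat c fail fuel (fail.getD b 0) else b

-- body of Source B's 'for k in range(2, n + 1)' building the failure table (fail[k] = ...)
def kmpTableBody (pat : List Char) (fail : List Nat) (k : Nat) : List Nat :=
  let c := pat.getD (k - 1) ' '
  let b0 := fail.getD (k - 1) 0
  let b := kmpTableLoop pat c fail b0 b0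
  fail.set k (if pat.getD b ' ' = c then b + 1 else 0)

-- 'fail = [0] * (n + 1); for k in range(2, n + 1): ...'  (range(2, n+1) has n+1-2 elements)
def kmpTable (pat : List Char) : List Nat :=
  (List.range' 2 (pat.length + 1 - 2)).foldl (kmpTableBody pat) (List.replicate (pat.length + 1) 0)

-- Source B's 'while state > 0 and (state == n or new_low[state] != c): state = fail[state]'
def kmpRunLoop (pat : List Char) (c : Char) (fail : List Nat) : Nat → Nat → Nat
  | 0, s => s
  | fuel + 1, s =>
    if 0 < s ∧ (s = pat.length ∨ pat.getD s ' ' ≠ c) then kmpRunLoop pat c fail fuel (fail.getD s 0) else s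

-- body of Source B's 'for c in prev_low' automaton loop
def kmpStep (pat : List Char) (fail : List Nat) (s : Nat) (c : Char) : Nat :=
  let s' := kmpRunLoop pat c fail s s
  if s' < pat.length ∧ pat.getD s' ' ' = c then s' + 1 else s'

def kmpRun (pat : List Char) (fail : List Nat) (p : List Char) : Nat :=
  p.foldl (kmpStep pat fail) 0

def trim_overlap_alt (prev_text : String) (new_text : String) (min_overlap : Int) (max_window : Int) : String :=
  if prev_text = "" ∨ new_text = "" then new_text
  else
    let prev_low := PySem.Str.lower (PySem.Str.slice prev_text (some (-max_window)) none)
    let new_low := PySem.Str.lower (PySem.Str.slice new_text none (some max_window))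
    let pat := new_low.toList
    let fail := kmpTable pat
    let state := kmpRun pat fail prev_low.toList
    if (state : Int) ≥ min_overlap then PySem.Str.lstrip (PySem.Str.slice new_text (some (state : Int)) none)
    else new_text

-- ===== PRECONDITION & SPEC =====
def Spec_trim_overlap (prev_text : String) (new_text : String) (min_overlap : Int) (max_window : Int) (out : String) : Prop := out = trim_overlap_alt prev_text new_text min_overlap max_window
instance (prev_text : String) (new_text : String) (min_overlap : Int) (max_window : Int) (out : String) : Decidable (Spec_trim_overlap prev_text new_text min_overlap max_window out) := by unfold Spec_trim_overlap; infer_instance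

-- ===== CLAIM (what is proved, stated in full; the proofs are below) =====
def Claim_equal_trim_overlap : Prop := ∀ (prev_text : String) (new_text : String) (min_overlap : Int) (max_window : Int), Dom_trim_overlap prev_text new_text min_overlap max_window → Spec_trim_overlap prev_text new_text min_overlap max_window (trim_overlap prev_text new_text min_overlap max_window)

-- ===== LEMMAS AND PROOFS =====

-- SPEC FUNCTION (proof-only): bScan n p = length of the longest suffix of p that is a prefix of n
def bScan (n : List Char) : List Char → Nat
  | [] => 0
  | c :: rest =>
    if PySem.Chars.startswith n (c :: rest) then rest.length + 1
    else bScan n rest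

lemma bScan_le_length (n : List Char) : ∀ p : List Char, bScan n p ≤ p.length := by
  intro p
  induction p with
  | nil => simp [bScan]
  | cons c rest ih =>
    simp only [bScan, List.length_cons]
    split_ifs with h
    · omega
    · omega

-- the suffix of length (bScan n p) of p is a prefix of n
lemma bScan_prefix (n : List Char) : ∀ p : List Char, p.drop (p.length - bScan n p) <+: n := by
  intro p
  induction p with
  | nil => simp [bScan]
  | cons c rest ih =>
    simp only [bScan, List.length_cons]
    split_ifs with h
    · have : rest.length + 1 - (rest.length + 1) = 0 := by omega
      rw [this, List.drop_zero]
      exact (PySem.Chars.startswith_iff n (c :: rest)).mp h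
    · have hle := bScan_le_length n rest
      have : rest.length + 1 - bScan n rest = (rest.length - bScan n rest) + 1 := by omega
      rw [this, List.drop_succ_cons]
      exact ih

lemma bScan_le_length_n (n p : List Char) : bScan n p ≤ n.length := by
  have h := bScan_prefix n p
  have h2 := h.length_le
  have h3 := bScan_le_length n p
  rw [List.length_drop] at h2
  omega

-- maximality: no longer suffix of p is a prefix of n
lemma bScan_max (n : List Char) : ∀ (p : List Char) (k : Nat), bScan n p < k → k ≤ p.length →
    ¬ (p.drop (p.length - k) <+: n) := by
  intro p
  induction p with
  | nil => intro k h1 h2; simp [bScan] at h1; simp at h2; omega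
  | cons c rest ih =>
    intro k h1 h2
    simp only [List.length_cons] at h2
    simp only [bScan, List.length_cons] at h1 ⊢
    split_ifs at h1 with h
    · omega
    · by_cases hk : k = rest.length + 1
      · subst hk
        have : rest.length + 1 - (rest.length + 1) = 0 := by omega
        rw [this, List.drop_zero]
        intro hpre
        exact h ((PySem.Chars.startswith_iff n (c :: rest)).mpr hpre)
      · have hk' : k ≤ rest.length := by omega
        have : rest.length + 1 - k = (rest.length - k) + 1 := by omega
        rw [this, List.drop_succ_cons]
        exact ih k h1 hk'

-- Galois direction: any prefix of n of length j that is a suffix of T forces j ≤ bScan n T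
lemma bScan_ge (n T : List Char) (j : Nat) (hj : j ≤ n.length) (h : n.take j <:+ T) :
    j ≤ bScan n T := by
  by_contra hlt
  push_neg at hlt
  have hlen : (n.take j).length = j := by simp [List.length_take]; omega
  have hjT : j ≤ T.length := by have := h.length_le; omega
  have := (List.suffix_iff_eq_drop).mp h
  rw [hlen] at this
  exact bScan_max n T j hlt hjT (by rw [← this]; exact List.take_prefix j n)

-- the matched part: n.take (bScan n T) is a suffix of T
lemma bScan_take_suffix (n T : List Char) : n.take (bScan n T) <:+ T := by
  have h := bScan_prefix n T
  have hL := bScan_le_length n T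
  have hlen : (T.drop (T.length - bScan n T)).length = bScan n T := by
    rw [List.length_drop]; omega
  have := (List.prefix_iff_eq_take).mp h
  rw [hlen] at this
  rw [← this]
  exact List.drop_suffix _ T

-- spec of the failure table: longest proper border length of pat.take j
def borderFn (pat : List Char) (j : Nat) : Nat := bScan pat ((pat.take j).drop 1)

lemma borderFn_le (pat : List Char) (j : Nat) (hj : j ≤ pat.length) :
    borderFn pat j ≤ j - 1 := by
  have h := bScan_le_length pat ((pat.take j).drop 1)
  rw [List.length_drop, List.length_take] at h
  unfold borderFn
  omega

lemma borderFn_take_suffix (pat : List Char) (j : Nat) :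
    pat.take (borderFn pat j) <:+ pat.take j :=
  (bScan_take_suffix pat ((pat.take j).drop 1)).trans (List.drop_suffix 1 _)

-- a shorter suffix of the same list is a suffix of a longer one
lemma suffix_of_suffix_length_le {l₁ l₂ l₃ : List Char} (h1 : l₁ <:+ l₃) (h2 : l₂ <:+ l₃)
    (hl : l₁.length ≤ l₂.length) : l₁ <:+ l₂ := by
  rw [← List.reverse_prefix] at h1 h2 ⊢
  exact List.prefix_of_prefix_length_le h1 h2 (by simpa using hl)

lemma append_single_suffix (l t : List Char) (a c : Char) :
    l ++ [a] <:+ t ++ [c] ↔ (l <:+ t ∧ a = c) := by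
  rw [← List.reverse_prefix, List.reverse_append, List.reverse_append]
  simp only [List.reverse_singleton, List.singleton_append, List.cons_prefix_cons]
  rw [List.reverse_prefix]
  tauto

lemma take_succ_suffix (pat T : List Char) (c : Char) (j : Nat) (hj : j < pat.length) :
    (pat.take (j + 1) <:+ T ++ [c] ↔ (pat.take j <:+ T ∧ pat.getD j ' ' = c)) := by
  have ht : pat.take (j + 1) = pat.take j ++ [pat.getD j ' '] := by
    rw [List.take_add_one]
    congr 1
    rw [List.getD_eq_getElem?_getD, List.getElem?_eq_getElem hj]
    rfl
  rw [ht, append_single_suffix]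

-- what the automaton body computes from a chain result r equals bScan on the extended text
lemma step_ov (pat T : List Char) (c : Char) (r : Nat)
    (h1 : pat.take r <:+ T) (h2 : r ≤ pat.length)
    (h3 : r = 0 ∨ (r < pat.length ∧ pat.getD r ' ' = c))
    (h4 : ∀ j, j ≤ pat.length → pat.take j <:+ T → (j = 0 ∨ (j < pat.length ∧ pat.getD j ' ' = c)) → j ≤ r) :
    (if r < pat.length ∧ pat.getD r ' ' = c then r + 1 else r) = bScan pat (T ++ [c]) := by
  have hLle : bScan pat (T ++ [c]) ≤ pat.length := bScan_le_length_n pat (T ++ [c])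
  have hLsuf : pat.take (bScan pat (T ++ [c])) <:+ T ++ [c] := bScan_take_suffix pat (T ++ [c])
  by_cases hc : r < pat.length ∧ pat.getD r ' ' = c
  · rw [if_pos hc]
    apply le_antisymm
    · exact bScan_ge pat (T ++ [c]) (r + 1) (by omega)
        ((take_succ_suffix pat T c r hc.1).mpr ⟨h1, hc.2⟩)
    · rcases Nat.eq_zero_or_pos (bScan pat (T ++ [c])) with h0 | hpos
      · omega
      · obtain ⟨m, hm⟩ : ∃ m, bScan pat (T ++ [c]) = m + 1 := ⟨_, (Nat.succ_pred_eq_of_pos hpos).symm⟩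
        rw [hm] at hLsuf hLle
        obtain ⟨hsfx, heq⟩ := (take_succ_suffix pat T c m (by omega)).mp hLsuf
        have := h4 m (by omega) hsfx (Or.inr ⟨by omega, heq⟩)
        omega
  · rw [if_neg hc]
    have hr0 : r = 0 := by
      rcases h3 with h | h
      · exact h
      · exact absurd h hc
    rcases Nat.eq_zero_or_pos (bScan pat (T ++ [c])) with h0 | hpos
    · omega
    · exfalso
      obtain ⟨m, hm⟩ : ∃ m, bScan pat (T ++ [c]) = m + 1 := ⟨_, (Nat.succ_pred_eq_of_pos hpos).symm⟩
      rw [hm] at hLsuf hLle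
      obtain ⟨hsfx, heq⟩ := (take_succ_suffix pat T c m (by omega)).mp hLsuf
      have hm0 := h4 m (by omega) hsfx (Or.inr ⟨by omega, heq⟩)
      have : m = 0 := by omega
      subst this
      exact hc ⟨by omega, by rwa [hr0]⟩

-- the while loop follows the border chain and returns the longest admissible match ≤ s
lemma runLoop_spec (pat T : List Char) (c : Char) (fail : List Nat) :
    ∀ (fuel s : Nat), s ≤ fuel → s ≤ pat.length → pat.take s <:+ T →
    (∀ j, 0 < j → j ≤ s → fail.getD j 0 = borderFn pat j) →
    (pat.take (kmpRunLoop pat c fail fuel s) <:+ T ∧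
     kmpRunLoop pat c fail fuel s ≤ s ∧
     (kmpRunLoop pat c fail fuel s = 0 ∨
       (kmpRunLoop pat c fail fuel s < pat.length ∧ pat.getD (kmpRunLoop pat c fail fuel s) ' ' = c)) ∧
     (∀ j, pat.take j <:+ T → j ≤ s → (j = 0 ∨ (j < pat.length ∧ pat.getD j ' ' = c)) →
        j ≤ kmpRunLoop pat c fail fuel s)) := by
  intro fuel
  induction fuel with
  | zero =>
    intro s hf _ _ _
    have hs0 : s = 0 := by omega
    subst hs0
    refine ⟨by simp [kmpRunLoop], by simp [kmpRunLoop], Or.inl (by simp [kmpRunLoop]), ?_⟩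
    intro j _ hj _
    simpa [kmpRunLoop] using hj
  | succ fuel ih =>
    intro s hf hs hsuf Hb
    by_cases hcond : 0 < s ∧ (s = pat.length ∨ pat.getD s ' ' ≠ c)
    · rw [show kmpRunLoop pat c fail (fuel + 1) s
            = kmpRunLoop pat c fail fuel (fail.getD s 0) by
          simp only [kmpRunLoop]; rw [if_pos hcond]]
      have hfb : fail.getD s 0 = borderFn pat s := Hb s hcond.1 le_rfl
      have hblt : borderFn pat s ≤ s - 1 := borderFn_le pat s hs
      have hsuf' : pat.take (fail.getD s 0) <:+ T := by
        rw [hfb]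
        exact (borderFn_take_suffix pat s).trans hsuf
      have ⟨p1, p2, p3, p4⟩ := ih (fail.getD s 0) (by omega) (by omega) hsuf'
        (fun j hj hjs => Hb j hj (by omega))
      refine ⟨p1, by omega, p3, ?_⟩
      intro j hjsuf hjs hjgood
      have hjne : j ≠ s := by
        rintro rfl
        rcases hjgood with h | h
        · omega
        · rcases hcond.2 with h' | h'
          · omega
          · exact h' h.2
      have hjlt : j < s := by omega
      have hjb : j ≤ fail.getD s 0 := by
        rcases Nat.eq_zero_or_pos j with rfl | hj0
        · omega
        · have hjtk : pat.take j <:+ pat.take s := by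
            apply suffix_of_suffix_length_le hjsuf hsuf
            simp [List.length_take]
            omega
          have hjtk' : pat.take j <:+ (pat.take s).drop 1 := by
            apply suffix_of_suffix_length_le hjtk (List.drop_suffix 1 _)
            simp [List.length_take, List.length_drop]
            omega
          rw [hfb]
          exact bScan_ge pat _ j (by omega) hjtk'
      exact p4 j hjsuf hjb hjgood
    · rw [show kmpRunLoop pat c fail (fuel + 1) s = s by
          simp only [kmpRunLoop]; rw [if_neg hcond]]
      push_neg at hcond
      refine ⟨hsuf, le_rfl, ?_, fun j _ hj _ => hj⟩
      rcases Nat.eq_zero_or_pos s with rfl | hs0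
      · exact Or.inl rfl
      · obtain ⟨hne, heq⟩ := hcond hs0
        exact Or.inr ⟨by omega, heq⟩

-- the automaton step maps the current longest overlap to the longest overlap of T ++ [c]
lemma kmpStep_eq (pat : List Char) (fail : List Nat)
    (Hb : ∀ j, 0 < j → j ≤ pat.length → fail.getD j 0 = borderFn pat j)
    (T : List Char) (c : Char) :
    kmpStep pat fail (bScan pat T) c = bScan pat (T ++ [c]) := by
  have hs : bScan pat T ≤ pat.length := bScan_le_length_n pat T
  have ⟨p1, p2, p3, p4⟩ := runLoop_spec pat T c fail (bScan pat T) (bScan pat T)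
    le_rfl hs (bScan_take_suffix pat T) (fun j hj hjs => Hb j hj (by omega))
  unfold kmpStep
  exact step_ov pat T c _ p1 (by omega) p3
    (fun j hj hjsuf hjgood => p4 j hjsuf (bScan_ge pat T j hj hjsuf) hjgood)

-- below the gate index n the table loop coincides with the run loop (b = n never holds)
lemma tableLoop_eq_runLoop (pat : List Char) (c : Char) (fail : List Nat)
    (Hf : ∀ j, 0 < j → fail.getD j 0 < j) :
    ∀ fuel b, b < pat.length → kmpTableLoop pat c fail fuel b = kmpRunLoop pat c fail fuel b := by
  intro fuel
  induction fuel with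
  | zero => intro b _; rfl
  | succ fuel ih =>
    intro b hb
    by_cases h : 0 < b ∧ pat.getD b ' ' ≠ c
    · have hr : 0 < b ∧ (b = pat.length ∨ pat.getD b ' ' ≠ c) := ⟨h.1, Or.inr h.2⟩
      rw [show kmpTableLoop pat c fail (fuel + 1) b
            = kmpTableLoop pat c fail fuel (fail.getD b 0) by
            simp only [kmpTableLoop]; rw [if_pos h],
          show kmpRunLoop pat c fail (fuel + 1) b
            = kmpRunLoop pat c fail fuel (fail.getD b 0) by
            simp only [kmpRunLoop]; rw [if_pos hr]]
      exact ih (fail.getD b 0) (lt_trans (Hf b h.1) hb)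
    · have hr : ¬ (0 < b ∧ (b = pat.length ∨ pat.getD b ' ' ≠ c)) := by
        push_neg at h ⊢
        intro hb0
        exact ⟨by omega, h hb0⟩
      rw [show kmpTableLoop pat c fail (fuel + 1) b = b by
            simp only [kmpTableLoop]; rw [if_neg h],
          show kmpRunLoop pat c fail (fuel + 1) b = b by
            simp only [kmpRunLoop]; rw [if_neg hr]]

-- invariant of the table-building fold: after k = 2 .. m+1, entries up to m+1 are borders, rest 0
lemma kmpTable_inv (pat : List Char) :
    ∀ m, (m = 0 ∨ m + 1 ≤ pat.length) →
      (((List.range' 2 m).foldl (kmpTableBody pat) (List.replicate (pat.length + 1) 0)).length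
          = pat.length + 1 ∧
       ∀ j, ((List.range' 2 m).foldl (kmpTableBody pat) (List.replicate (pat.length + 1) 0)).getD j 0
          = if j ≤ m + 1 then borderFn pat j else 0) := by
  intro m
  induction m with
  | zero =>
    intro _
    refine ⟨by simp, ?_⟩
    intro j
    have hrep : (List.replicate (pat.length + 1) 0).getD j 0 = 0 := by
      rw [List.getD_eq_getElem?_getD]
      rcases Nat.lt_or_ge j (pat.length + 1) with h | h
      · simp [List.getElem?_replicate, h]
      · have hlen : (List.replicate (pat.length + 1) (0 : Nat)).length ≤ j := by
          simp only [List.length_replicate]; omega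
        simp [List.getElem?_eq_none hlen]
    simp only [List.range'_zero, List.foldl_nil, hrep]
    split_ifs with hj
    · interval_cases j
      · simp [borderFn, bScan]
      · unfold borderFn
        have : (pat.take 1).drop 1 = [] := by
          apply List.drop_eq_nil_of_le
          simp [List.length_take]
        rw [this]
        simp [bScan]
    · rfl
  | succ m ih =>
    intro hm
    have hmn : m + 2 ≤ pat.length := by
      rcases hm with h | h
      · omega
      · omega
    obtain ⟨ihlen, ihval⟩ := ih (by omega)
    set fl := (List.range' 2 m).foldl (kmpTableBody pat) (List.replicate (pat.length + 1) 0) with hfl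
    have hrange : List.range' 2 (m + 1) = List.range' 2 m ++ [2 + m] := by
      have := List.range'_concat (step := 1) (s := 2) (n := m)
      simpa using this
    rw [hrange, List.foldl_append]
    simp only [List.foldl_cons, List.foldl_nil, ← hfl]
    -- analyse the body at k = m + 2
    have hk1 : (2 + m) - 1 = m + 1 := by omega
    have hb0 : fl.getD (m + 1) 0 = borderFn pat (m + 1) := by
      rw [ihval (m + 1)]; simp
    have Hf : ∀ j, 0 < j → fl.getD j 0 < j := by
      intro j hj
      rw [ihval j]
      split_ifs with h
      · have := borderFn_le pat j (by omega)
        omega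
      · omega
    have hb0lt : fl.getD (m + 1) 0 < pat.length := by
      rw [hb0]
      have := borderFn_le pat (m + 1) (by omega)
      omega
    -- the loop result
    set c := pat.getD (m + 1) ' ' with hc
    set T : List Char := (pat.take (m + 1)).drop 1 with hT
    have hb0T : fl.getD (m + 1) 0 = bScan pat T := by rw [hb0]; rfl
    have ⟨p1, p2, p3, p4⟩ := runLoop_spec pat T c fl (fl.getD (m + 1) 0) (fl.getD (m + 1) 0)
      le_rfl (by omega) (by rw [hb0T]; exact bScan_take_suffix pat T)
      (fun j hj hjs => by
        have hble := borderFn_le pat (m + 1) (by omega : m + 1 ≤ pat.length)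
        rw [hb0] at hjs
        rw [ihval j, if_pos (by omega)])
    set r := kmpRunLoop pat c fl (fl.getD (m + 1) 0) (fl.getD (m + 1) 0) with hr
    have hrlt : r < pat.length := by omega
    -- the stored value is bScan pat (T ++ [c]) = borderFn pat (m + 2)
    have hmax : ∀ j, j ≤ pat.length → pat.take j <:+ T →
        (j = 0 ∨ (j < pat.length ∧ pat.getD j ' ' = c)) → j ≤ r := by
      intro j _ hjsuf hjgood
      have hjT : j ≤ bScan pat T := by
        apply bScan_ge pat T j _ hjsuf
        have := hjsuf.length_le
        simp [hT, List.length_drop, List.length_take] at this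
        omega
      exact p4 j hjsuf (by omega) hjgood
    have hval : (if pat.getD r ' ' = c then r + 1 else 0)
        = bScan pat (T ++ [c]) := by
      rw [← step_ov pat T c r p1 (by omega) p3 hmax]
      by_cases hrc : pat.getD r ' ' = c
      · rw [if_pos hrc, if_pos ⟨hrlt, hrc⟩]
      · rw [if_neg hrc, if_neg (by tauto)]
        rcases p3 with h | h
        · omega
        · exact absurd h.2 hrc
    have hTLr : kmpTableLoop pat c fl (fl.getD (m + 1) 0) (fl.getD (m + 1) 0) = r := by
      rw [hr]
      exact tableLoop_eq_runLoop pat c fl Hf _ _ hb0lt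
    have hTc : T ++ [c] = (pat.take (m + 2)).drop 1 := by
      have htk : pat.take (m + 2) = pat.take (m + 1) ++ [pat.getD (m + 1) ' '] := by
        rw [List.take_add_one]
        congr 1
        rw [List.getD_eq_getElem?_getD, List.getElem?_eq_getElem (by omega)]
        rfl
      rw [htk, List.drop_append_of_le_length (by simp [List.length_take]; omega)]
    have hborder : (if pat.getD r ' ' = c then r + 1 else 0) = borderFn pat (m + 2) := by
      rw [hval, hTc]; rfl
    -- the updated list
    constructor
    · simp [kmpTableBody, ihlen]
    · intro j
      simp only [kmpTableBody, hk1, ← hc, hTLr]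
      by_cases hj : j = 2 + m
      · subst hj
        have hlt : 2 + m < fl.length := by rw [ihlen]; omega
        rw [List.getD_eq_getElem?_getD, List.getElem?_set_self hlt]
        simp only [Option.getD_some]
        have h2m : 2 + m = m + 2 := by omega
        rw [h2m, hborder, if_pos (show m + 2 ≤ m + 1 + 1 by omega)]
      · rw [List.getD_eq_getElem?_getD, List.getElem?_set_ne (fun h => hj h.symm), ← List.getD_eq_getElem?_getD,
            ihval j]
        split_ifs with h1 h2 h2
        · rfl
        · omega
        · omega
        · rfl

lemma kmpTable_spec (pat : List Char) :
    ∀ j, 0 < j → j ≤ pat.length → (kmpTable pat).getD j 0 = borderFn pat j := by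
  intro j hj hjn
  unfold kmpTable
  have hm : (pat.length + 1 - 2) = 0 ∨ (pat.length + 1 - 2) + 1 ≤ pat.length := by omega
  obtain ⟨_, hval⟩ := kmpTable_inv pat (pat.length + 1 - 2) hm
  rw [hval j, if_pos (by omega)]

-- streaming the whole text computes the longest overlap
lemma kmpRun_fold (pat : List Char) (fail : List Nat)
    (Hb : ∀ j, 0 < j → j ≤ pat.length → fail.getD j 0 = borderFn pat j) :
    ∀ (rest T : List Char), rest.foldl (kmpStep pat fail) (bScan pat T) = bScan pat (T ++ rest) := by
  intro rest
  induction rest with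
  | nil => intro T; simp
  | cons c rest ih =>
    intro T
    rw [List.foldl_cons, kmpStep_eq pat fail Hb T c, ih (T ++ [c]), List.append_assoc]
    rfl

lemma kmpRun_eq (pat p : List Char) : kmpRun pat (kmpTable pat) p = bScan pat p := by
  have h := kmpRun_fold pat (kmpTable pat) (kmpTable_spec pat) p []
  simpa [kmpRun, bScan] using h

-- ===== A-side: the descending loop equals the bScan spec =====

-- bridge: A's 'prev_low.endswith(new_low[:k])' is exactly 'the suffix of p of length k is a prefix of n'
lemma endswith_take_iff (p n : List Char) (k : Nat) (hp : k ≤ p.length) (hn : k ≤ n.length) :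
    (PySem.Chars.endswith p (n.take k) = true ↔ p.drop (p.length - k) <+: n) := by
  rw [PySem.Chars.endswith_iff]
  constructor
  · intro h
    have hlen : (n.take k).length = k := by simp [List.length_take]; omega
    have := (List.suffix_iff_eq_drop).mp h
    rw [hlen] at this
    rw [← this]
    exact List.take_prefix k n
  · intro h
    have hlen : (p.drop (p.length - k)).length = k := by simp [List.length_drop]; omega
    have := (List.prefix_iff_eq_take).mp h
    rw [hlen] at this
    have hsuf : p.drop (p.length - k) <:+ p := List.drop_suffix _ p
    rw [this] at hsuf
    exact hsuf

-- A's descending loop returns bScan when the threshold is met, else 0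
lemma trimLoopA_eq (s t : String) (m : Int) :
    ∀ (N : Nat) (k : Int), (bScan t.toList s.toList : Int) ≤ k →
      k ≤ min (s.toList.length : Int) (t.toList.length : Int) →
      (k - m).toNat = N →
      trimLoopA s t k m =
        (if m < (bScan t.toList s.toList : Int) then (bScan t.toList s.toList : Int) else 0) := by
  intro N
  induction N with
  | zero =>
    intro k hL hk hN
    have hkm : k ≤ m := by omega
    rw [trimLoopA, if_pos hkm]
    have : ¬ m < (bScan t.toList s.toList : Int) := by omega
    rw [if_neg this]
  | succ N ih =>
    intro k hL hk hN
    have hmk : m < k := by omega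
    have hk0 : 0 ≤ k := le_trans (Int.natCast_nonneg _) hL
    have hLp : bScan t.toList s.toList ≤ s.toList.length := bScan_le_length t.toList s.toList
    have hLn : bScan t.toList s.toList ≤ t.toList.length := bScan_le_length_n t.toList s.toList
    rw [trimLoopA, if_neg (by omega : ¬ k ≤ m)]
    have htest : PySem.Str.endswith s (PySem.Str.slice t none (some k))
        = PySem.Chars.endswith s.toList (t.toList.take k.toNat) := by
      rw [PySem.Str.endswith_eq, PySem.Str.toList_slice, PySem.Chars.slice_eq_listSlice,
          PySem.List.slice_to _ hk0]
    rw [htest]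
    by_cases hkL : k = (bScan t.toList s.toList : Int)
    · have hkt : k.toNat = bScan t.toList s.toList := by omega
      have hmatch : PySem.Chars.endswith s.toList (t.toList.take k.toNat) = true := by
        rw [hkt]
        exact (endswith_take_iff s.toList t.toList _ hLp hLn).mpr (bScan_prefix t.toList s.toList)
      rw [if_pos hmatch, hkL, if_pos (by omega)]
    · have hLk : (bScan t.toList s.toList : Int) < k := lt_of_le_of_ne hL (fun h => hkL h.symm)
      have hkp : k.toNat ≤ s.toList.length := by omega
      have hkn : k.toNat ≤ t.toList.length := by omega
      have hnomatch : ¬ (PySem.Chars.endswith s.toList (t.toList.take k.toNat) = true) := fun hcon =>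
        bScan_max t.toList s.toList k.toNat (by omega) hkp
          ((endswith_take_iff s.toList t.toList k.toNat hkp hkn).mp hcon)
      rw [if_neg hnomatch]
      exact ih (k - 1) (by omega) (by omega) (by omega)

-- the two ports agree when neither input string is empty
lemma main_ne (prev_text new_text : String) (mo mw : Int)
    (h : ¬ (prev_text = "" ∨ new_text = "")) :
    trim_overlap prev_text new_text mo mw = trim_overlap_alt prev_text new_text mo mw := by
  unfold trim_overlap trim_overlap_alt
  rw [if_neg h, if_neg h]
  simp only []
  set s := PySem.Str.lower (PySem.Str.slice prev_text (some (-mw)) none) with hs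
  set t := PySem.Str.lower (PySem.Str.slice new_text none (some mw)) with ht
  set L : Nat := bScan t.toList s.toList with hLdef
  have hLp : L ≤ s.toList.length := bScan_le_length t.toList s.toList
  have hLn : L ≤ t.toList.length := bScan_le_length_n t.toList s.toList
  have hloop : trimLoopA s t (min (PySem.Str.len s) (PySem.Str.len t)) (mo - 1) =
      (if mo - 1 < (L : Int) then (L : Int) else 0) := by
    rw [PySem.Str.len_eq, PySem.Str.len_eq]
    exact trimLoopA_eq s t (mo - 1) _ _ (by omega) (by omega) rfl
  have hrun : kmpRun t.toList (kmpTable t.toList) s.toList = L := kmpRun_eq t.toList s.toList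
  rw [hloop, hrun]
  by_cases hcase : mo ≤ (L : Int)
  · rw [if_pos (by omega), if_pos (by omega), if_pos (by omega)]
  · rw [if_neg (by omega), if_neg (by omega)]

-- ===== VERDICT (by name: the statement is the Claim_ definition above) =====
theorem trim_overlap_spec : Claim_equal_trim_overlap := by
  intro prev_text new_text min_overlap max_window _hDom
  unfold Spec_trim_overlap
  by_cases h : prev_text = "" ∨ new_text = ""
  · unfold trim_overlap trim_overlap_alt
    rw [if_pos h, if_pos h]
  · exact main_ne prev_text new_text min_overlap max_window h
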